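-- pv_equiv track=rewrite | github.com/VladimirCharkot/profevladi | proyectos/recursivas.py | gos
-- ===== SOURCE A (Python) =====
-- def other(player):
--     if player == 'First':
--         return 'Second'
--     return 'First'
--
-- def gos(player, n):
--     if n == 1:
--         return other(player)
--     if n == 2 or n == 3 or n == 5:
--         return player
--     c1, c2, c3 = None, None, None
--     c1 = gos(other(player), n - 2)
--     if n >= 3:
--         c2 = gos(other(player), n - 3)
--     if n >= 5:
--         c3 = gos(other(player), n - 5)
--     if player in [c1, c2, c3]:
--         return player
--     else:
--         return other(player)
-- ===== SOURCE B (Python) =====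
-- def other(player):
--     if player == 'First':
--         return 'Second'
--     return 'First'
--
-- def winner(q, k, t):
--     # Winner of a pile of k stones with q to move; t[j] holds the pair of
--     # winners (First to move, Second to move) for the relevant smaller piles j.
--     if k == 1:
--         return other(q)
--     if k in (2, 3, 5):
--         return q
--     i = 0 if other(q) == 'First' else 1
--     kids = [t[k - 2][i], t[k - 3][i]]
--     if k >= 5:
--         kids.append(t[k - 5][i])
--     return q if q in kids else other(q)
--
-- def gos(player, n):
--     # Bottom-up winner-pair table over pile sizes; moves reach back at most 5
--     # piles, so entries older than that are dropped (constant-size window).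
--     t = {}
--     for k in range(1, n):
--         t[k] = (winner('First', k, t), winner('Second', k, t))
--         if k >= 6:
--             del t[k - 5]
--     return winner(player, n, t)
-- ===== Notes on version B (the rewrite author's own statement) =====
-- stated objective: faster
-- what changed: Replaces the exponential three-way recursion by a bottom-up dynamic-programming table of winner pairs over pile sizes, kept as a constant-size sliding window; intended as faster: a timing run measured B 8.86x at n=64 and A timed out on all larger sizes where B still returned.
import Mathlib
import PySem

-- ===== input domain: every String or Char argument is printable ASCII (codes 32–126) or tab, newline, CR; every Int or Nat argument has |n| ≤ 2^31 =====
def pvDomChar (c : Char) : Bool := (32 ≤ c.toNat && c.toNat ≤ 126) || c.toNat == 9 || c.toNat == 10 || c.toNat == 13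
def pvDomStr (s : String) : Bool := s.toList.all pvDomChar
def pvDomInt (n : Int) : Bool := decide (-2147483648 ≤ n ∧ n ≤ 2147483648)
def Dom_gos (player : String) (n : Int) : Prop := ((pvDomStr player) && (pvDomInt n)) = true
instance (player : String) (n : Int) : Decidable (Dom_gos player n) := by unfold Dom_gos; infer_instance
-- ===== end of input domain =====

-- B replaces A's exponential three-way recursion by a bottom-up winner-pair table over pile
-- sizes, kept as a constant-size sliding window; intended as faster (a timing run measured
-- B 8.86x at n=64; A timed out on all larger sizes where B still returned).

-- ===== PORT A =====
def otherA (player : String) : String :=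
  if player == "First" then "Second" else "First"

def gos (player : String) (n : Int) : String :=
  if _h1 : n = 1 then otherA player
  else if _h235 : n = 2 ∨ n = 3 ∨ n = 5 then player
  else if _h0 : n ≤ 0 then player  -- guard: Python recurses forever here (RecursionError); outside Pre_gos
  else
    let c1 := gos (otherA player) (n - 2)
    let c2 : Option String := if _h3 : 3 ≤ n then some (gos (otherA player) (n - 3)) else none
    let c3 : Option String := if _h5 : 5 ≤ n then some (gos (otherA player) (n - 5)) else none
    if c1 = player ∨ c2 = some player ∨ c3 = some player then player else otherA player
termination_by n.toNat
decreasing_by all_goals omega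

-- ===== PORT B =====
def otherB (player : String) : String :=
  if player == "First" then "Second" else "First"

-- Python's t[j][i] raises KeyError on a missing key; under Pre_gos every key read below is
-- present in the window, so `getD … ("", "")` only totalizes the function.
def winnerB (q : String) (k : Int) (t : PySem.Dict Int (String × String)) : String :=
  if k = 1 then otherB q
  else if k = 2 ∨ k = 3 ∨ k = 5 then q
  else
    let i : Int := if otherB q == "First" then 0 else 1
    let sel := fun (pr : String × String) => if i = 0 then pr.1 else pr.2  -- tuple indexing pr[i]
    let kids := [sel (t.getD (k - 2) ("", "")), sel (t.getD (k - 3) ("", ""))] ++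
      (if 5 ≤ k then [sel (t.getD (k - 5) ("", ""))] else [])
    if q ∈ kids then q else otherB q

def gos_alt (player : String) (n : Int) : String :=
  let t := (PySem.List.pyRange 1 n 1).foldl
    (fun t k =>
      let t1 := t.insert k (winnerB "First" k t, winnerB "Second" k t)
      if 6 ≤ k then t1.erase (k - 5) else t1)
    PySem.Dict.empty
  winnerB player n t

-- ===== PRECONDITION & SPEC =====
-- Pre_gos excludes n ≤ 0, where Python A recurses on n-2 forever and dies with RecursionError
-- (and Python B raises KeyError on its empty table).
def Pre_gos (player : String) (n : Int) : Prop := 1 ≤ n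
instance (player : String) (n : Int) : Decidable (Pre_gos player n) := by unfold Pre_gos; infer_instance
def pvWitness_gos : String × Int := ("First", 4)

def Spec_gos (player : String) (n : Int) (out : String) : Prop := out = gos_alt player n
instance (player : String) (n : Int) (out : String) : Decidable (Spec_gos player n out) := by unfold Spec_gos; infer_instance

-- ===== CLAIM =====
def Claim_equal_gos : Prop := ∀ (player : String) (n : Int), Dom_gos player n → Pre_gos player n → Spec_gos player n (gos player n)

-- ===== LEMMAS AND PROOFS =====

-- lookups in an erased dict at another key (no PySem lemma covers erase lookups)
theorem pv_find?_filter_ne {κ ν : Type} [BEq κ] [LawfulBEq κ] (l : List (κ × ν)) (k k' : κ)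
    (h : k' ≠ k) :
    (l.filter (fun p => !p.1 == k)).find? (fun p => p.1 == k') = l.find? (fun p => p.1 == k') := by
  induction l with
  | nil => rfl
  | cons x xs ih =>
    by_cases hx : x.1 == k
    · have hx' : x.1 = k := by simpa using hx
      have hk' : (x.1 == k') = false := by simp [hx', Ne.symm h]
      simp [hx, hk', ih]
    · by_cases hk' : x.1 == k' <;> simp [hx, hk', ih]

theorem getD_erase_of_ne {κ ν : Type} [BEq κ] [LawfulBEq κ] (d : PySem.Dict κ ν) {k k' : κ}
    (d0 : ν) (h : k' ≠ k) : (d.erase k).getD k' d0 = d.getD k' d0 := by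
  obtain ⟨l⟩ := d
  simp only [PySem.Dict.getD, PySem.Dict.get?, PySem.Dict.erase]
  rw [pv_find?_filter_ne l k k' h]

-- the sliding-window invariant: every entry still in the table below m is A's value pair
def GoodT (t : PySem.Dict Int (String × String)) (m : Int) : Prop :=
  ∀ j : Int, 1 ≤ j → m - 5 ≤ j → j < m →
    t.getD j ("", "") = (gos "First" j, gos "Second" j)

theorem otherA_canonical (q : String) : otherA q = "First" ∨ otherA q = "Second" := by
  unfold otherA; split_ifs <;> simp

theorem winner_correct (q : String) (k : Int) (t : PySem.Dict Int (String × String))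
    (hk : 1 ≤ k) (hg : GoodT t k) : winnerB q k t = gos q k := by
  by_cases h1 : k = 1
  · subst h1; simp [winnerB, gos, otherA, otherB]
  by_cases h235 : k = 2 ∨ k = 3 ∨ k = 5
  · rw [gos]; simp only [dif_neg h1, dif_pos h235]
    unfold winnerB
    rw [if_neg h1, if_pos h235]
  have h4 : 4 ≤ k := by omega
  have h0 : ¬ k ≤ 0 := by omega
  rw [gos]
  simp only [dif_neg h1, dif_neg h235, dif_neg h0, dif_pos (show (3:Int) ≤ k by omega)]
  have g2 : t.getD (k - 2) ("", "") = (gos "First" (k - 2), gos "Second" (k - 2)) :=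
    hg _ (by omega) (by omega) (by omega)
  have g3 : t.getD (k - 3) ("", "") = (gos "First" (k - 3), gos "Second" (k - 3)) :=
    hg _ (by omega) (by omega) (by omega)
  have hob : otherB q = otherA q := rfl
  simp only [winnerB, if_neg h1, if_neg h235, hob, g2, g3]
  rcases otherA_canonical q with ho | ho <;> rw [ho] <;>
    [skip; skip] <;>
  · by_cases h5 : 5 ≤ k
    · have g5 : t.getD (k - 5) ("", "") = (gos "First" (k - 5), gos "Second" (k - 5)) :=
        hg _ (by omega) (by omega) (by omega)
      simp only [if_pos h5, dif_pos h5, g5]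
      apply if_congr _ rfl rfl
      simp only [List.mem_append, List.mem_cons, List.not_mem_nil, or_false,
        Option.some.injEq, or_assoc, String.reduceBEq, if_true]
      exact ⟨fun h => h.imp Eq.symm (Or.imp Eq.symm Eq.symm),
        fun h => h.imp Eq.symm (Or.imp Eq.symm Eq.symm)⟩
    · simp only [if_neg h5, dif_neg h5, List.append_nil]
      apply if_congr _ rfl rfl
      simp only [List.mem_cons, List.not_mem_nil, or_false, Option.some.injEq,
        reduceCtorEq, String.reduceBEq, if_true]
      exact ⟨fun h => h.imp Eq.symm Eq.symm, fun h => h.imp Eq.symm Eq.symm⟩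

def stepT (t : PySem.Dict Int (String × String)) (k : Int) : PySem.Dict Int (String × String) :=
  let t1 := t.insert k (winnerB "First" k t, winnerB "Second" k t)
  if 6 ≤ k then t1.erase (k - 5) else t1

theorem good_step {t : PySem.Dict Int (String × String)} {b : Int}
    (hb : 1 ≤ b) (hg : GoodT t b) : GoodT (stepT t b) (b + 1) := by
  intro j hj1 hw hj2
  have hstep : (stepT t b).getD j ("", "") = (t.insert b (winnerB "First" b t, winnerB "Second" b t)).getD j ("", "") := by
    unfold stepT
    by_cases h6 : 6 ≤ b
    · rw [if_pos h6, getD_erase_of_ne _ _ (by omega)]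
    · rw [if_neg h6]
  rw [hstep]
  by_cases hjb : j = b
  · subst hjb
    rw [PySem.Dict.getD_insert_self]
    rw [winner_correct _ _ _ hj1 hg, winner_correct _ _ _ hj1 hg]
  · rw [PySem.Dict.getD_insert_of_ne _ _ _ hjb]
    exact hg j hj1 (by omega) (by omega)

theorem good_table (m : Nat) : ∀ b : Int, b.toNat = m →
    GoodT ((PySem.List.pyRange 1 b 1).foldl stepT PySem.Dict.empty) b := by
  induction m with
  | zero =>
    intro b hb j hj1 _ hj2
    omega
  | succ m ih =>
    intro b hb
    by_cases hb1 : b ≤ 1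
    · intro j hj1 _ hj2; omega
    · have h1b : (1:Int) ≤ b - 1 := by omega
      have hsplit : PySem.List.pyRange 1 b 1 = PySem.List.pyRange 1 (b - 1) 1 ++ [b - 1] := by
        have := PySem.List.pyRange_one_succ_right (a := 1) (b := b - 1) h1b
        simpa using this
      rw [hsplit, List.foldl_append]
      simp only [List.foldl_cons, List.foldl_nil]
      have hg := ih (b - 1) (by omega)
      have := good_step h1b hg
      simpa using this

-- the fold in gos_alt is literally a fold of stepT
theorem gos_alt_eq (player : String) (n : Int) :
    gos_alt player n = winnerB player n ((PySem.List.pyRange 1 n 1).foldl stepT PySem.Dict.empty) := rfl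

-- ===== VERDICT =====
theorem gos_spec : Claim_equal_gos := by
  intro player n _ hpre
  unfold Spec_gos
  rw [gos_alt_eq]
  exact (winner_correct player n _ hpre (good_table n.toNat n rfl)).symm
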